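-- pv_equiv track=rewrite | github.com/pypi-data/pypi-mirror-358 | packages/tgit/tgit-0.17.1.tar.gz/tgit-0.17.1/tgit/version.py | extract_context_lines
-- ===== SOURCE A (Python) =====
-- def extract_context_lines(diff: list[str]) -> dict[int, str]:
--     print_lines = {}
--     for i, line in enumerate(diff):
--         if line.startswith(("+", "-")):
--             for j in range(i - 3, i + 3):
--                 if j >= 0 and j < len(diff):
--                     print_lines[j] = diff[j][0]
--     return print_lines
-- ===== SOURCE B (Python) =====
-- def extract_context_lines(diff: list[str]) -> dict[int, str]:
--     n = len(diff)
--     print_lines = {}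
--     for j in range(n):
--         if any(0 <= i < n and diff[i].startswith(("+", "-"))
--                for i in range(j - 2, j + 4)):
--             print_lines[j] = diff[j][0]
--     return print_lines
-- ===== Notes on version B (the rewrite author's own statement) =====
-- stated objective: alternative
-- what changed: B flips the traversal: instead of painting a 6-wide window of marks around each '+'/'-' change line (A), B makes a single pass over the output indices and marks index j iff some line in range(j-2, j+4) is a change, producing the identical dict (same keys, values and insertion order).
-- outside the precondition, e.g. on extract_context_lines(['+a', '']): A raises IndexError, B raises IndexError
import Mathlib
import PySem

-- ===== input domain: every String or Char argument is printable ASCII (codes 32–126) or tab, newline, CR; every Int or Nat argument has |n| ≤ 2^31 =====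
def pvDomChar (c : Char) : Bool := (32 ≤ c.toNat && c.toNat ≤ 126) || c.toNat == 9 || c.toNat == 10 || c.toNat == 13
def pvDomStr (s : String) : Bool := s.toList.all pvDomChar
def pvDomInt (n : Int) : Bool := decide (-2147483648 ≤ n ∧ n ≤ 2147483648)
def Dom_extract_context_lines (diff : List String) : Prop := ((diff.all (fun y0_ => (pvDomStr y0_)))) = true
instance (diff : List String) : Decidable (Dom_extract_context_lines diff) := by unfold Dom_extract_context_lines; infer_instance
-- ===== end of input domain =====

-- B flips the traversal: instead of painting a window around each '+'/'-' change (A), it scans each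
-- output index once and asks whether a change lies nearby; same values, same key order (objective: alternative).

-- shared transliteration helpers: `line.startswith(("+", "-"))` and `diff[j][0]` (both appear verbatim in Source A and Source B)
def pvStarts (line : String) : Bool :=
  PySem.Str.startswith line "+" || PySem.Str.startswith line "-"

def pvFirst (diff : List String) (j : Int) : String :=
  ((PySem.Str.pyGet? (PySem.List.pyGetD diff j "") 0).map (fun c => String.ofList [c])).getD ""

-- ===== PORT A =====
def extract_context_lines (diff : List String) : List (Int × String) :=
  ((PySem.List.enumerate diff 0).foldl (fun d (p : Int × String) =>
    if pvStarts p.2 then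
      (PySem.List.pyRange (p.1 - 3) (p.1 + 3) 1).foldl (fun d j =>
        if decide (0 ≤ j) && decide (j < (diff.length : Int)) then
          d.insert j (pvFirst diff j)
        else d) d
    else d) PySem.Dict.empty).items

-- ===== PORT B =====
def extract_context_lines_alt (diff : List String) : List (Int × String) :=
  ((PySem.List.pyRange 0 (diff.length : Int) 1).foldl (fun d j =>
    if (PySem.List.pyRange (j - 2) (j + 4) 1).any (fun i =>
        decide (0 ≤ i) && decide (i < (diff.length : Int)) &&
          pvStarts (PySem.List.pyGetD diff i "")) then
      d.insert j (pvFirst diff j)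
    else d) PySem.Dict.empty).items

-- ===== PRECONDITION & SPEC =====
-- Pre_ excludes exactly the inputs on which the Python A raises IndexError: a marked line
-- (within the window of a '+'/'-' line) that is the empty string, where `diff[j][0]` fails.
def Pre_extract_context_lines (diff : List String) : Prop :=
  ∀ j < diff.length, (∃ i < diff.length,
      (PySem.Str.startswith (diff.getD i "") "+"
        || PySem.Str.startswith (diff.getD i "") "-") = true ∧
      (i : Int) - 3 ≤ (j : Int) ∧ (j : Int) ≤ (i : Int) + 2) →
    diff.getD j "" ≠ ""
instance (diff : List String) : Decidable (Pre_extract_context_lines diff) := by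
  unfold Pre_extract_context_lines; infer_instance

def pvWitness_extract_context_lines : List String := ["ctx", "+new", "-old", "tail"]

def Spec_extract_context_lines (diff : List String) (out : List (Int × String)) : Prop := out = extract_context_lines_alt diff
instance (diff : List String) (out : List (Int × String)) : Decidable (Spec_extract_context_lines diff out) := by unfold Spec_extract_context_lines; infer_instance

-- ===== CLAIM (what is proved, stated in full; the proofs are below) =====
def Claim_equal_extract_context_lines : Prop := ∀ (diff : List String), Dom_extract_context_lines diff → Pre_extract_context_lines diff → Spec_extract_context_lines diff (extract_context_lines diff)

-- ===== LEMMAS AND PROOFS =====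

-- proof-only abbreviations
def pvCb (diff : List String) (i : Int) : Bool :=
  decide (0 ≤ i) && decide (i < (diff.length : Int)) && pvStarts (PySem.List.pyGetD diff i "")

def pvWin (i j : Int) : Bool := decide (i - 3 ≤ j) && decide (j ≤ i + 2)

def pvNearK (diff : List String) (s j : Int) : Bool :=
  (PySem.List.pyRange 0 s 1).any (fun i => pvCb diff i && pvWin i j)

def pvMarks (diff : List String) (P : Int → Bool) : List (Int × String) :=
  ((PySem.List.pyRange 0 (diff.length : Int) 1).filter P).map (fun j => (j, pvFirst diff j))

-- the mid-window predicate for the inner-loop invariant of A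
def pvPmid (diff : List String) (s a j : Int) : Bool :=
  pvNearK diff s j || (decide (s - 3 ≤ j) && decide (j < a))

theorem pvMarks_congr (diff : List String) {P Q : Int → Bool}
    (h : ∀ j, 0 ≤ j → j < (diff.length : Int) → P j = Q j) :
    pvMarks diff P = pvMarks diff Q := by
  unfold pvMarks
  rw [List.filter_congr]
  intro j hj
  rw [PySem.List.mem_pyRange_one] at hj
  exact h j hj.1 hj.2

theorem pvContains_marks (diff : List String) (P : Int → Bool) (a : Int)
    (h0 : 0 ≤ a) (hn : a < (diff.length : Int)) :
    (PySem.Dict.mk (pvMarks diff P) : PySem.Dict Int String).contains a = P a := by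
  rw [PySem.Dict.contains_mk]
  unfold pvMarks
  cases hPa : P a with
  | true =>
    simp only [List.any_eq_true, List.mem_map, List.mem_filter,
      PySem.List.mem_pyRange_one]
    exact ⟨(a, pvFirst diff a), ⟨a, ⟨⟨h0, hn⟩, hPa⟩, rfl⟩, by simp⟩
  | false =>
    simp only [List.any_eq_false]
    intro p hp
    rw [List.mem_map] at hp
    obtain ⟨j, hj, rfl⟩ := hp
    rw [List.mem_filter] at hj
    simp only [beq_iff_eq]
    rintro rfl
    rw [hPa] at hj; exact Bool.false_ne_true hj.2

-- B-side: a fold of guarded inserts over fresh distinct keys appends the filtered pairs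
theorem pvFoldl_if_insert_fresh (diff : List String) (p : Int → Bool) :
    ∀ (l : List Int) (d : PySem.Dict Int String),
      (∀ j ∈ l, d.contains j = false) → l.Nodup →
      ((l.foldl (fun d j => if p j then d.insert j (pvFirst diff j) else d) d)).items
        = d.items ++ (l.filter p).map (fun j => (j, pvFirst diff j)) := by
  intro l
  induction l with
  | nil => intro d _ _; simp
  | cons x xs ih =>
    intro d hfresh hnd
    have hx : d.contains x = false := hfresh x (List.mem_cons_self)
    have hnd' := (List.nodup_cons.mp hnd)
    simp only [List.foldl_cons, List.filter_cons]
    by_cases hp : p x = true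
    case neg =>
      rw [if_neg hp, if_neg hp]
      rw [ih d (fun j hj => hfresh j (List.mem_cons_of_mem _ hj)) hnd'.2]
    case pos =>
      rw [if_pos hp, if_pos hp]
      rw [ih (d.insert x (pvFirst diff x))
        (fun j hj => by
          rw [PySem.Dict.contains_insert]
          have hjx : j ≠ x := fun h => hnd'.1 (h ▸ hj)
          simp [hjx, hfresh j (List.mem_cons_of_mem _ hj)])
        hnd'.2]
      rw [PySem.Dict.items_insert_of_not_contains d _ hx]
      simp

theorem pvAlt_eq_marks (diff : List String) :
    extract_context_lines_alt diff
      = pvMarks diff (fun j => (PySem.List.pyRange (j - 2) (j + 4) 1).any (fun i => pvCb diff i)) := by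
  unfold extract_context_lines_alt
  rw [pvFoldl_if_insert_fresh diff _ _ PySem.Dict.empty
    (fun j _ => PySem.Dict.contains_empty j) (PySem.List.nodup_pyRange_one 0 _)]
  rw [show (PySem.Dict.empty : PySem.Dict Int String).items = [] from rfl, List.nil_append]
  rfl

-- the '+'/'-' test of B's inner any IS pvCb
theorem pvNearB_eq (diff : List String) (j : Int) :
    ((PySem.List.pyRange (j - 2) (j + 4) 1).any (fun i => pvCb diff i))
      = pvNearK diff (diff.length : Int) j := by
  simp only [pvNearK]
  cases h : (PySem.List.pyRange 0 (diff.length : Int) 1).any (fun i => pvCb diff i && pvWin i j) with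
  | true =>
    rw [List.any_eq_true] at h ⊢
    obtain ⟨i, hmem, hi⟩ := h
    simp only [pvCb, pvWin, Bool.and_eq_true, decide_eq_true_eq] at hi
    obtain ⟨⟨⟨h0, hn⟩, hc⟩, hw1, hw2⟩ := hi
    refine ⟨i, PySem.List.mem_pyRange_one.mpr ⟨by omega, by omega⟩, ?_⟩
    simp only [pvCb, Bool.and_eq_true, decide_eq_true_eq]
    exact ⟨⟨h0, hn⟩, hc⟩
  | false =>
    rw [List.any_eq_false] at h ⊢
    intro i hmem
    rw [PySem.List.mem_pyRange_one] at hmem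
    intro hcontra
    simp only [pvCb, Bool.and_eq_true, decide_eq_true_eq] at hcontra
    obtain ⟨⟨h0, hn⟩, hc⟩ := hcontra
    apply h i (PySem.List.mem_pyRange_one.mpr ⟨h0, hn⟩)
    simp only [pvCb, pvWin, Bool.and_eq_true, decide_eq_true_eq]
    exact ⟨⟨⟨h0, hn⟩, hc⟩, by omega, by omega⟩

-- if a is unmarked (relative to the first s lines) and a ≥ s-3, nothing beyond a is marked either
theorem pvNear_high (diff : List String) (s a : Int) (hsa : s - 3 ≤ a)
    (hA : pvNearK diff s a = false) : ∀ j, a < j → pvNearK diff s j = false := by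
  intro j haj
  cases hj : pvNearK diff s j with
  | false => rfl
  | true =>
    exfalso
    unfold pvNearK at hj hA
    rw [List.any_eq_true] at hj
    obtain ⟨i, hmem, hi⟩ := hj
    rw [PySem.List.mem_pyRange_one] at hmem
    simp only [pvWin, Bool.and_eq_true, decide_eq_true_eq] at hi
    obtain ⟨hc, hw1, hw2⟩ := hi
    rw [List.any_eq_false] at hA
    have := hA i (PySem.List.mem_pyRange_one.mpr hmem)
    simp only [pvWin, Bool.and_eq_true, decide_eq_true_eq, not_and] at this
    exact this hc (by omega) (by omega)

theorem pvPmid_step_ne (diff : List String) (s a j : Int) (hja : j ≠ a) :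
    pvPmid diff s a j = pvPmid diff s (a + 1) j := by
  simp only [pvPmid]
  congr 1
  congr 1
  rw [decide_eq_decide]
  omega

-- one inner-loop step of A, as a transformation of the marks predicate
theorem pvStepOne (diff : List String) (s a : Int) (hlo : s - 3 ≤ a) (hhi : a ≤ s + 2) :
    (if decide (0 ≤ a) && decide (a < (diff.length : Int)) then
        (PySem.Dict.mk (pvMarks diff (pvPmid diff s a)) : PySem.Dict Int String).insert a (pvFirst diff a)
      else PySem.Dict.mk (pvMarks diff (pvPmid diff s a)))
      = PySem.Dict.mk (pvMarks diff (pvPmid diff s (a + 1))) := by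
  by_cases hin : 0 ≤ a ∧ a < (diff.length : Int)
  · rw [if_pos (by simp [hin.1, hin.2])]
    have hA : pvPmid diff s a a = pvNearK diff s a := by
      simp [pvPmid]
    cases hPa : pvNearK diff s a with
    | true =>
      -- a is already a key with the same value: overwrite is the identity
      have hc : (PySem.Dict.mk (pvMarks diff (pvPmid diff s a)) : PySem.Dict Int String).contains a = true := by
        rw [pvContains_marks diff _ a hin.1 hin.2, hA, hPa]
      apply PySem.Dict.ext
      rw [PySem.Dict.items_insert_of_contains _ _ hc]
      show List.map _ (pvMarks diff (pvPmid diff s a)) = pvMarks diff (pvPmid diff s (a + 1))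
      have hpt : ∀ p ∈ pvMarks diff (pvPmid diff s a),
          (if (p.1 == a) = true then (a, pvFirst diff a) else p) = p := by
        intro p hp
        unfold pvMarks at hp
        obtain ⟨j, _, rfl⟩ := List.mem_map.mp hp
        by_cases hja : j = a
        · subst hja; simp
        · simp [show (j == a) = false by simp [hja]]
      have hmap : List.map (fun p => if (p.1 == a) = true then (a, pvFirst diff a) else p)
          (pvMarks diff (pvPmid diff s a)) = pvMarks diff (pvPmid diff s a) := by
        calc List.map (fun p => if (p.1 == a) = true then (a, pvFirst diff a) else p)
              (pvMarks diff (pvPmid diff s a))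
            = List.map id (pvMarks diff (pvPmid diff s a)) := List.map_congr_left hpt
          _ = pvMarks diff (pvPmid diff s a) := List.map_id _
      rw [hmap]
      apply pvMarks_congr
      intro j _ _
      by_cases hja : j = a
      · subst hja
        have h1 : pvPmid diff s j j = true := by rw [hA, hPa]
        have h2 : pvPmid diff s (j + 1) j = true := by
          simp only [pvPmid]
          rw [show pvNearK diff s j = true from hPa]
          rfl
        rw [h1, h2]
      · exact pvPmid_step_ne diff s a j hja
    | false =>
      -- a is a fresh key: the insert appends, and no later index is marked yet
      have hc : (PySem.Dict.mk (pvMarks diff (pvPmid diff s a)) : PySem.Dict Int String).contains a = false := by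
        rw [pvContains_marks diff _ a hin.1 hin.2, hA, hPa]
      apply PySem.Dict.ext
      rw [PySem.Dict.items_insert_of_not_contains _ _ hc]
      show pvMarks diff (pvPmid diff s a) ++ [(a, pvFirst diff a)] = pvMarks diff (pvPmid diff s (a + 1))
      have hhigh := pvNear_high diff s a hlo hPa
      -- split the index range [0, n) at a and a+1
      unfold pvMarks
      rw [PySem.List.pyRange_one_append 0 a (diff.length : Int) hin.1 (le_of_lt hin.2),
        PySem.List.pyRange_one_cons hin.2]
      simp only [List.filter_append, List.filter_cons, List.map_append]
      have hlow : ∀ j ∈ PySem.List.pyRange 0 a 1, pvPmid diff s a j = pvPmid diff s (a + 1) j := by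
        intro j hj
        rw [PySem.List.mem_pyRange_one] at hj
        exact pvPmid_step_ne diff s a j (by omega)
      have htail : ∀ j ∈ PySem.List.pyRange (a + 1) (diff.length : Int) 1,
          pvPmid diff s a j = false ∧ pvPmid diff s (a + 1) j = false := by
        intro j hj
        rw [PySem.List.mem_pyRange_one] at hj
        have hnj : pvNearK diff s j = false := hhigh j (by omega)
        constructor <;>
          simp [pvPmid, hnj, show ¬ (j < a) by omega, show ¬ (j < a + 1) by omega]
      rw [List.filter_congr hlow]
      have h1 : List.filter (pvPmid diff s a) (PySem.List.pyRange (a + 1) (diff.length : Int) 1) = [] :=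
        List.filter_eq_nil_iff.mpr (fun j hj => by simp [(htail j hj).1])
      have h2 : List.filter (pvPmid diff s (a + 1)) (PySem.List.pyRange (a + 1) (diff.length : Int) 1) = [] :=
        List.filter_eq_nil_iff.mpr (fun j hj => by simp [(htail j hj).2])
      have ha1 : pvPmid diff s a a = false := by rw [hA, hPa]
      have ha2 : pvPmid diff s (a + 1) a = true := by
        simp [pvPmid, hlo]
      rw [h1, h2, ha1, ha2]
      simp
  · rw [if_neg (by simp; omega)]
    congr 1
    apply pvMarks_congr
    intro j h0 hn
    exact pvPmid_step_ne diff s a j (by omega)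

-- the whole inner loop of A, by induction on the window length
theorem pvWindowAux (diff : List String) (s : Int) :
    ∀ (k : Nat) (a : Int), s - 3 ≤ a → a + k = s + 3 →
      ((PySem.List.pyRange a (s + 3) 1).foldl (fun d j =>
          if decide (0 ≤ j) && decide (j < (diff.length : Int)) then
            d.insert j (pvFirst diff j)
          else d) (PySem.Dict.mk (pvMarks diff (pvPmid diff s a))))
        = PySem.Dict.mk (pvMarks diff (pvPmid diff s (s + 3))) := by
  intro k
  induction k with
  | zero =>
    intro a _ hk
    have ha : a = s + 3 := by push_cast at hk; omega
    subst ha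
    rw [PySem.List.pyRange_one_eq_nil (by omega)]
    rfl
  | succ k ih =>
    intro a hlo hk
    rw [PySem.List.pyRange_one_cons (by omega)]
    simp only [List.foldl_cons]
    rw [pvStepOne diff s a hlo (by omega)]
    exact ih (a + 1) (by omega) (by omega)

-- boundary conversions for the inner-loop invariant
theorem pvPmid_lo (diff : List String) (s : Int) :
    pvPmid diff s (s - 3) = pvNearK diff s := by
  funext j
  simp only [pvPmid]
  rcases lt_or_ge j (s - 3) with h | h
  · simp [show ¬ (s - 3 ≤ j) by omega]
  · simp [show ¬ (j < s - 3) by omega]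

theorem pvPmid_hi (diff : List String) (s : Int) (h0 : 0 ≤ s)
    (hcb : pvCb diff s = true) :
    ∀ j, pvPmid diff s (s + 3) j = pvNearK diff (s + 1) j := by
  intro j
  simp only [pvPmid, pvNearK]
  rw [PySem.List.pyRange_one_succ_right (by omega), List.any_append]
  simp only [List.any_cons, List.any_nil, Bool.or_false, hcb, Bool.true_and]
  congr 1
  simp only [pvWin]
  congr 1
  rw [decide_eq_decide]
  omega

-- the outer loop of A: processing the suffix from line s extends the marks to all lines
theorem pvOuter (diff : List String) :
    ∀ (xs : List String) (s : Nat), xs = diff.drop s →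
      ((PySem.List.enumerate xs (s : Int)).foldl (fun d (p : Int × String) =>
          if pvStarts p.2 then
            (PySem.List.pyRange (p.1 - 3) (p.1 + 3) 1).foldl (fun d j =>
              if decide (0 ≤ j) && decide (j < (diff.length : Int)) then
                d.insert j (pvFirst diff j)
              else d) d
          else d) (PySem.Dict.mk (pvMarks diff (pvNearK diff (s : Int)))))
        = PySem.Dict.mk (pvMarks diff (pvNearK diff (diff.length : Int))) := by
  intro xs
  induction xs with
  | nil =>
    intro s hs
    have hn : diff.length ≤ s := by
      by_contra h
      have := congrArg List.length hs
      simp at this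
      omega
    simp only [PySem.List.enumerate_nil, List.foldl_nil]
    congr 1
    apply pvMarks_congr
    intro j _ _
    simp only [pvNearK]
    rw [PySem.List.pyRange_one_append 0 (diff.length : Int) (s : Int)
      (by positivity) (by exact_mod_cast hn), List.any_append]
    have : (PySem.List.pyRange (diff.length : Int) (s : Int) 1).any
        (fun i => pvCb diff i && pvWin i j) = false := by
      rw [List.any_eq_false]
      intro i hi
      rw [PySem.List.mem_pyRange_one] at hi
      simp [pvCb, show ¬ (i < (diff.length : Int)) by omega]
    rw [this, Bool.or_false]
  | cons x xs ih =>
    intro s hs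
    have hsx : diff[s]? = some x := by
      have : (diff.drop s)[0]? = some x := by rw [← hs]; rfl
      rwa [List.getElem?_drop, Nat.add_zero] at this
    have hslt : s < diff.length := (List.getElem?_eq_some_iff.mp hsx).1
    have hxs : xs = diff.drop (s + 1) := by
      rw [← List.tail_drop, ← hs]
      rfl
    have hget : PySem.List.pyGetD diff (s : Int) "" = x := by
      rw [PySem.List.pyGetD_natCast]
      simp [hsx]
    rw [PySem.List.enumerate_cons]
    simp only [List.foldl_cons]
    cases hst : pvStarts x with
    | false =>
      rw [if_neg (by simp)]
      have hstep : pvMarks diff (pvNearK diff (s : Int))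
          = pvMarks diff (pvNearK diff ((s : Int) + 1)) := by
        apply pvMarks_congr
        intro j _ _
        simp only [pvNearK]
        rw [PySem.List.pyRange_one_succ_right (by positivity), List.any_append]
        simp [pvCb, hget, hst]
      rw [hstep]
      have := ih (s + 1) hxs
      push_cast at this ⊢
      exact this
    | true =>
      rw [if_pos rfl]
      have hcb : pvCb diff (s : Int) = true := by
        simp [pvCb, hget, hst]
        exact_mod_cast hslt
      rw [← pvPmid_lo diff (s : Int)]
      have hw := pvWindowAux diff (s : Int) 6 ((s : Int) - 3) (by omega) (by omega)
      rw [hw]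
      have hhi : pvMarks diff (pvPmid diff (s : Int) ((s : Int) + 3))
          = pvMarks diff (pvNearK diff ((s : Int) + 1)) := by
        apply pvMarks_congr
        intro j _ _
        exact pvPmid_hi diff (s : Int) (by positivity) hcb j
      rw [hhi]
      have := ih (s + 1) hxs
      push_cast at this ⊢
      exact this

theorem pvA_eq_marks (diff : List String) :
    extract_context_lines diff = pvMarks diff (pvNearK diff (diff.length : Int)) := by
  unfold extract_context_lines
  have h := pvOuter diff diff 0 rfl
  simp only [Nat.cast_zero] at h
  have hm : pvMarks diff (pvNearK diff 0) = [] := by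
    unfold pvMarks
    rw [List.filter_eq_nil_iff.mpr (fun j _ => by simp [pvNearK])]
    rfl
  rw [hm] at h
  rw [show (PySem.Dict.empty : PySem.Dict Int String) = PySem.Dict.mk [] from rfl]
  rw [h]

-- ===== VERDICT (by name: the statement is the Claim_ definition above) =====
theorem extract_context_lines_spec : Claim_equal_extract_context_lines := by
  intro diff _ _
  show extract_context_lines diff = extract_context_lines_alt diff
  rw [pvA_eq_marks, pvAlt_eq_marks]
  apply pvMarks_congr
  intro j _ _
  exact (pvNearB_eq diff j).symm
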